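-- pv_equiv track=rewrite | github.com/JavierCastellD/InitiationCodonMutationPredictor | src/web/SeqUtils/seq_utils.py | is_snp_affecting_initiation_codon
-- ===== SOURCE A (Python) =====
-- CODON_LENGTH = 3
--
-- def is_snp_affecting_initiation_codon(cdna:str, cds:str, mutated_cdna:str):
--     if len(cdna) != len(mutated_cdna):
--         return False
--
--     pos_change = []
--     for i in range(0, len(cdna)):
--         if cdna[i] != mutated_cdna[i]:
--             pos_change.append(i)
--
--     if len(pos_change) != 1:
--         return False
--
--     init_codon_pos = get_translation_start_pos(cdna, cds)
--     if (pos_change[0] < init_codon_pos) | (pos_change[0] > init_codon_pos + CODON_LENGTH - 1):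
--         return False
--
--     return True
--
-- def get_translation_start_pos(cdna:str, cds:str) -> int:
--     return cdna.find(cds)
-- ===== SOURCE B (Python) =====
-- CODON_LENGTH = 3
--
-- def is_snp_affecting_initiation_codon(cdna: str, cds: str, mutated_cdna: str):
--     if len(cdna) != len(mutated_cdna):
--         return False
--
--     n = len(cdna)
--     # scan from the left for the first mismatch
--     i = 0
--     while i < n and cdna[i] == mutated_cdna[i]:
--         i += 1
--     if i == n:
--         return False  # identical sequences: no SNP at all
--
--     # scan from the right for the last mismatch
--     j = n - 1
--     while cdna[j] == mutated_cdna[j]: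
--         j -= 1
--     if i != j:
--         return False  # more than one differing position
--
--     init_codon_pos = cdna.find(cds)
--     return init_codon_pos <= i <= init_codon_pos + CODON_LENGTH - 1
-- ===== Notes on version B (the rewrite author's own statement) =====
-- stated objective: faster
-- what changed: Replaces A's accumulate-all-differing-indices list pass with two converging mismatch scans (first from the left, last from the right) that stop early; the SNP is unique iff they meet, then the same find-based codon-window test is applied.
import Mathlib
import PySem

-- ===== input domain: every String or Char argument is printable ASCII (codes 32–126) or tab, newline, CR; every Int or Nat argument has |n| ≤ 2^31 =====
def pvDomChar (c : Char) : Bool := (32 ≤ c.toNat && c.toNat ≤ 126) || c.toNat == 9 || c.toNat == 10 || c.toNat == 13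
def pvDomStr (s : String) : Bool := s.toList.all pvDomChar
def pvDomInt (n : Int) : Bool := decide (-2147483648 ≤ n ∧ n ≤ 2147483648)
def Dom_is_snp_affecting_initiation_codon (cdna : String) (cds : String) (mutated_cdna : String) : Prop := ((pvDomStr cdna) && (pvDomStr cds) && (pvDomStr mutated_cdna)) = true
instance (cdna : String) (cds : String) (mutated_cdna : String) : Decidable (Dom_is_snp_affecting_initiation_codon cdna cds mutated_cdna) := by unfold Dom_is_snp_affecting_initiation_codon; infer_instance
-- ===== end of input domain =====

-- B replaces A's accumulate-all-differing-indices pass by two converging mismatch scans (first from the left, last from the right); same result, alternative decomposition.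

-- ===== PORT A =====
def get_translation_start_pos (cdna : String) (cds : String) : Int :=
  PySem.Str.find cdna cds

def is_snp_affecting_initiation_codon (cdna : String) (cds : String) (mutated_cdna : String) : Bool :=
  if cdna.toList.length ≠ mutated_cdna.toList.length then false
  else
    let pos_change : List Int :=
      (PySem.List.pyRange 0 (cdna.toList.length : Int) 1).foldl
        (fun acc i =>
          if PySem.List.pyGetD cdna.toList i ' ' ≠ PySem.List.pyGetD mutated_cdna.toList i ' ' then
            acc ++ [i]
          else acc) []
    if pos_change.length ≠ 1 then false
    else
      let init_codon_pos := get_translation_start_pos cdna cds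
      if (decide (PySem.List.pyGetD pos_change 0 0 < init_codon_pos)) ||
         (decide (PySem.List.pyGetD pos_change 0 0 > init_codon_pos + 3 - 1)) then false
      else true

-- ===== PORT B =====
-- left-to-right scan for the first index where the two sequences differ ('while' loop of Source B)
def pvFirstDiff : List Char → List Char → Option Nat
  | a :: as, b :: bs => if a = b then (pvFirstDiff as bs).map (· + 1) else some 0
  | _, _ => none

def is_snp_affecting_initiation_codon_alt (cdna : String) (cds : String) (mutated_cdna : String) : Bool :=
  let a := cdna.toList
  let m := mutated_cdna.toList
  if a.length ≠ m.length then false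
  else
    match pvFirstDiff a m with
    | none => false
    | some i =>
      -- right-to-left scan = left scan of the reversed sequences
      match pvFirstDiff a.reverse m.reverse with
      | none => false
      | some k =>
        let j := a.length - 1 - k
        if i ≠ j then false
        else
          let init_codon_pos := PySem.Str.find cdna cds
          decide (init_codon_pos ≤ (i : Int)) && decide ((i : Int) ≤ init_codon_pos + 3 - 1)

-- ===== PRECONDITION & SPEC =====
def Spec_is_snp_affecting_initiation_codon (cdna : String) (cds : String) (mutated_cdna : String) (out : Bool) : Prop := out = is_snp_affecting_initiation_codon_alt cdna cds mutated_cdna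
instance (cdna : String) (cds : String) (mutated_cdna : String) (out : Bool) : Decidable (Spec_is_snp_affecting_initiation_codon cdna cds mutated_cdna out) := by unfold Spec_is_snp_affecting_initiation_codon; infer_instance

-- ===== CLAIM (what is proved, stated in full; the proofs are below) =====
def Claim_equal_is_snp_affecting_initiation_codon : Prop := ∀ (cdna : String) (cds : String) (mutated_cdna : String), Dom_is_snp_affecting_initiation_codon cdna cds mutated_cdna → Spec_is_snp_affecting_initiation_codon cdna cds mutated_cdna (is_snp_affecting_initiation_codon cdna cds mutated_cdna)

-- ===== LEMMAS AND PROOFS =====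

-- the set of differing indices, as A accumulates it (in Nat form)
def pvDiffs (a m : List Char) : List Nat :=
  (List.range a.length).filter (fun k => decide (a.getD k ' ' ≠ m.getD k ' '))

theorem pvDiffs_cons (x : Char) (a : List Char) (y : Char) (m : List Char) :
    pvDiffs (x :: a) (y :: m) = (if x = y then [] else [0]) ++ (pvDiffs a m).map (· + 1) := by
  unfold pvDiffs
  rw [List.length_cons, List.range_succ_eq_map, List.filter_cons, List.filter_map]
  by_cases hxy : x = y <;>
    · simp [hxy, Function.comp_def]
      exact List.map_congr_left (fun _ _ => rfl)

theorem pvDiffs_snoc (a m : List Char) (x y : Char) (h : a.length = m.length) :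
    pvDiffs (a ++ [x]) (m ++ [y]) = pvDiffs a m ++ (if x = y then [] else [a.length]) := by
  unfold pvDiffs
  rw [List.length_append, List.length_singleton, List.range_succ, List.filter_append]
  congr 1
  · apply List.filter_congr
    intro k hk
    have hk' : k < a.length := List.mem_range.mp hk
    have h1 : (a ++ [x]).getD k ' ' = a.getD k ' ' := by
      simp [List.getD_eq_getElem?_getD, List.getElem?_append_left hk']
    have h2 : (m ++ [y]).getD k ' ' = m.getD k ' ' := by
      simp [List.getD_eq_getElem?_getD, List.getElem?_append_left (h ▸ hk')]
    rw [h1, h2]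
  · have h1 : (a ++ [x])[a.length]? = some x := by
      simp
    have h2 : (m ++ [y])[a.length]? = some y := by
      rw [h]; simp
    by_cases hxy : x = y <;>
      simp [List.getD_eq_getElem?_getD, h1, h2, hxy]

theorem pvDiffs_mem {a m : List Char} {k : Nat} (h : k ∈ pvDiffs a m) : k < a.length := by
  unfold pvDiffs at h
  have := List.mem_of_mem_filter h
  simpa using this

theorem pvDiffs_nodup (a m : List Char) : (pvDiffs a m).Nodup := by
  exact (List.nodup_range).filter _

theorem pvFirstDiff_eq_head (a m : List Char) (h : a.length = m.length) :
    pvFirstDiff a m = (pvDiffs a m).head? := by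
  induction a generalizing m with
  | nil =>
    simp [pvFirstDiff, pvDiffs]
  | cons x a ih =>
    cases m with
    | nil => simp at h
    | cons y m =>
      have h' : a.length = m.length := by simpa using h
      rw [pvDiffs_cons]
      by_cases hxy : x = y <;>
        simp [pvFirstDiff, hxy, ih m h', List.head?_map]

theorem pvFirstDiff_rev (a m : List Char) (h : a.length = m.length) :
    pvFirstDiff a.reverse m.reverse = ((pvDiffs a m).getLast?).map (fun k => a.length - 1 - k) := by
  induction a using List.reverseRecOn generalizing m with
  | nil =>
    simp [pvFirstDiff, pvDiffs]
  | append_singleton a x ih =>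
    cases m using List.reverseRecOn with
    | nil => simp at h
    | append_singleton m y =>
      have h' : a.length = m.length := by
        simpa using h
      rw [List.reverse_append, List.reverse_append]
      simp only [List.reverse_singleton, List.singleton_append]
      rw [pvDiffs_snoc a m x y h']
      by_cases hxy : x = y
      · rw [show pvFirstDiff (x :: a.reverse) (y :: m.reverse)
              = (pvFirstDiff a.reverse m.reverse).map (· + 1) by simp [pvFirstDiff, hxy]]
        rw [ih m h', if_pos hxy, List.append_nil]
        cases hg : (pvDiffs a m).getLast? with
        | none => simp
        | some g =>
          have hlt : g < a.length := pvDiffs_mem (List.mem_of_getLast? hg)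
          simp only [Option.map_some, List.length_append, List.length_singleton]
          congr 1
          omega
      · rw [show pvFirstDiff (x :: a.reverse) (y :: m.reverse) = some 0 by simp [pvFirstDiff, hxy]]
        rw [if_neg hxy, List.getLast?_concat]
        simp

theorem pos_change_eq (c m : String) :
    (PySem.List.pyRange 0 (c.toList.length : Int) 1).foldl
      (fun acc i =>
        if PySem.List.pyGetD c.toList i ' ' ≠ PySem.List.pyGetD m.toList i ' ' then acc ++ [i]
        else acc) []
    = (pvDiffs c.toList m.toList).map (fun k => (k : Int)) := by
  rw [PySem.List.pyRange_zero_nat, List.foldl_map,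
      PySem.List.foldl_append_ite
        (p := fun k : Nat => PySem.List.pyGetD c.toList (k : Int) ' ' ≠ PySem.List.pyGetD m.toList (k : Int) ' ')
        (f := fun k : Nat => (k : Int))]
  simp [pvDiffs, PySem.List.pyGetD_natCast, ← List.map_eq_flatMap]

-- ===== VERDICT (by name: the statement is the Claim_ definition above) =====
theorem is_snp_affecting_initiation_codon_spec : Claim_equal_is_snp_affecting_initiation_codon := by
  intro cdna cds mcdna _
  unfold Spec_is_snp_affecting_initiation_codon is_snp_affecting_initiation_codon
    is_snp_affecting_initiation_codon_alt get_translation_start_pos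
  by_cases hlen : cdna.toList.length = mcdna.toList.length
  · have hlenS : cdna.length = mcdna.length := by simpa using hlen
    rw [pos_change_eq cdna mcdna]
    cases hd : pvDiffs cdna.toList mcdna.toList with
    | nil => simp [hd, hlenS, pvFirstDiff_eq_head _ _ hlen]
    | cons k1 rest =>
      cases rest with
      | nil =>
        have hk : k1 < mcdna.length := by
          have := pvDiffs_mem (hd ▸ List.mem_singleton_self k1)
          simpa [hlen] using this
        have hk2 : k1 < cdna.toList.length := by
          rw [hlen]; simpa using hk
        have hkj2 : cdna.toList.length - 1 - (cdna.toList.length - 1 - k1) = k1 := by omega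
        simp only [pvFirstDiff_eq_head _ _ hlen, pvFirstDiff_rev _ _ hlen, hd,
          List.head?_cons, List.getLast?_singleton, Option.map_some, hkj2,
          if_pos hlen, if_pos rfl, ← List.map_eq_flatMap, List.map_cons, List.map_nil,
          List.length_cons, List.length_nil, PySem.List.pyGetD_zero_cons]
        have hguard : ¬ (cdna.toList.length ≠ mcdna.toList.length) := by omega
        rw [if_neg hguard, if_neg hguard, if_neg (by simp : ¬ (k1 ≠ k1))]
        simp
        by_cases h1 : PySem.Chars.find cdna.toList cds.toList ≤ (k1 : Int) <;>
          by_cases h2 : (k1 : Int) < PySem.Chars.find cdna.toList cds.toList + 3 <;>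
            simp [h1, h2, not_le, not_lt] <;> omega
      | cons k2 rest2 =>
        have hnd := pvDiffs_nodup cdna.toList mcdna.toList
        rw [hd] at hnd
        have hgl : (k1 :: k2 :: rest2).getLast? = some ((k2 :: rest2).getLast (by simp)) := by
          rw [List.getLast?_cons_cons]
          exact List.getLast?_eq_some_getLast (by simp)
        have hgm : (k2 :: rest2).getLast (by simp) ∈ k2 :: rest2 := List.getLast_mem _
        have hglt : (k2 :: rest2).getLast (by simp) < mcdna.length := by
          have := pvDiffs_mem (hd ▸ List.mem_cons_of_mem k1 hgm)
          simpa [hlen] using this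
        have hne : ¬ (k1 = mcdna.length - 1 - (mcdna.length - 1 - (k2 :: rest2).getLast (by simp))) := by
          have hj : mcdna.length - 1 - (mcdna.length - 1 - (k2 :: rest2).getLast (by simp))
              = (k2 :: rest2).getLast (by simp) := by omega
          rw [hj]
          intro he
          exact (List.nodup_cons.mp hnd).1 (he ▸ hgm)
        simp [hd, hlenS, pvFirstDiff_eq_head _ _ hlen, pvFirstDiff_rev _ _ hlen, hgl, hne]
  · have hlenS : ¬ (cdna.length = mcdna.length) := by simpa using hlen
    simp [hlenS]
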